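-- pv_equiv track=rewrite | github.com/hereisjohnny2/TruthTable | Tabelas.py | checkNegacao
-- ===== SOURCE A (Python) =====
-- def checkNegacao(prop, opp):
--     i = 0
--     while(i < len(prop)):
--         if prop[i] == "~":
--             prep = prop[i+1]
--             opp.append(f"~{prep}")
--             prop[i] = f"~{prep}"
--             prop.pop(i+1)
--         i+=1
--     return prop
-- ===== SOURCE B (Python) =====
-- def checkNegacao(prop, opp):
--     # Single left-to-right pass: on "~", consume the following token and emit
--     # the merged "~<tok>"; rebuilds prop in place and appends merges to opp,
--     # like the original.
--     res = []
--     it = iter(prop)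
--     for tok in it:
--         if tok == "~":
--             merged = "~" + next(it)
--             opp.append(merged)
--             res.append(merged)
--         else:
--             res.append(tok)
--     prop[:] = res
--     return prop
-- ===== Notes on version B (the rewrite author's own statement) =====
-- stated objective: alternative
-- what changed: Replaces the in-place while loop with repeated list.pop (which shifts the tail on every merge, worst-case quadratic) by a single forward pass over an iterator that consumes the token after each '~' and builds the result list once.
import Mathlib
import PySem

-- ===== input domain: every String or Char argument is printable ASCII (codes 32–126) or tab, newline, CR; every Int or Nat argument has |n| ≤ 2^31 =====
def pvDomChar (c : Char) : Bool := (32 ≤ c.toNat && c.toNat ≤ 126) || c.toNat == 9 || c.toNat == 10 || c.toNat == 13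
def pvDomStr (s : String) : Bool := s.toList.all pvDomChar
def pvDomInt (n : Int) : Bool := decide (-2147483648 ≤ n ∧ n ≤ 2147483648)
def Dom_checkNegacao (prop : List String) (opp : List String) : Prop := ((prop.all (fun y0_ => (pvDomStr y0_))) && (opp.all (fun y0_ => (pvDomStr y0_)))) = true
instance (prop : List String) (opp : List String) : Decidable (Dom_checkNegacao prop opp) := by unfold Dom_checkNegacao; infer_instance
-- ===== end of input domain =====

-- B replaces A's in-place while loop with repeated pop by one forward pass building
-- the result once. Both A and B mutate prop and append the merged tokens to opp; the
-- equivalence proved here is about the RETURN value (B performs the same mutations).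

-- ===== PORT A =====
-- while loop over index i; state = (prop, opp, i); prop.pop(i+1) = eraseIdx (i+1)
-- (the popped value is unused). prop[i+1] may raise IndexError: pyGet? returns none
-- there and the port returns the current prop (inputs excluded by Pre_checkNegacao).
def checkNegacaoA_loop (prop : List String) (opp : List String) (i : Nat) : List String :=
  if h : i < prop.length then
    if prop[i] = "~" then
      match hp : PySem.List.pyGet? prop ((i + 1 : Nat) : Int) with
      | none => prop  -- Python raises IndexError here; outside Pre_checkNegacao
      | some prep =>
        let merged := "~" ++ prep
        checkNegacaoA_loop ((prop.set i merged).eraseIdx (i + 1)) (opp ++ [merged]) (i + 1)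
    else checkNegacaoA_loop prop opp (i + 1)
  else prop
termination_by prop.length - i
decreasing_by
  · have h2 : i + 1 < prop.length := by
      rw [PySem.List.pyGet?_natCast] at hp
      exact (List.getElem?_eq_some_iff.mp hp).1
    simp [List.length_eraseIdx, List.length_set, h2]
    omega
  · omega

def checkNegacao (prop : List String) (opp : List String) : List String :=
  checkNegacaoA_loop prop opp 0

-- ===== PORT B =====
-- single forward pass: on "~" consume the next token and emit the merged token.
-- Python's next(it) raises StopIteration on a trailing lone "~": the port returns []
-- for the remainder there (inputs excluded by Pre_checkNegacao).
def negMerge : List String → List String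
  | [] => []
  | tok :: rest =>
    if tok = "~" then
      match rest with
      | [] => []  -- Python raises StopIteration here; outside Pre_checkNegacao
      | nxt :: rest' => ("~" ++ nxt) :: negMerge rest'
    else tok :: negMerge rest
termination_by l => l.length
decreasing_by all_goals simp

def checkNegacao_alt (prop : List String) (opp : List String) : List String :=
  negMerge prop

-- ===== PRECONDITION & SPEC =====
-- length of the maximal trailing run of "~" tokens
def tildeRun (l : List String) : Nat := (l.reverse.takeWhile (fun s => s == "~")).length

-- Pre_ excludes exactly the inputs on which Python A raises IndexError (a "~" reached
-- with no following token): those are the lists whose trailing run of "~" has odd length.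
def Pre_checkNegacao (prop : List String) (opp : List String) : Prop :=
  tildeRun prop % 2 = 0
instance (prop : List String) (opp : List String) : Decidable (Pre_checkNegacao prop opp) := by
  unfold Pre_checkNegacao; infer_instance

def pvWitness_checkNegacao : List String × List String := (["~", "p", "q"], [])

def Spec_checkNegacao (prop : List String) (opp : List String) (out : List String) : Prop := out = checkNegacao_alt prop opp
instance (prop : List String) (opp : List String) (out : List String) : Decidable (Spec_checkNegacao prop opp out) := by unfold Spec_checkNegacao; infer_instance

-- ===== CLAIM (what is proved, stated in full; the proofs are below) =====
def Claim_equal_checkNegacao : Prop := ∀ (prop : List String) (opp : List String), Dom_checkNegacao prop opp → Pre_checkNegacao prop opp → Spec_checkNegacao prop opp (checkNegacao prop opp)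

-- ===== LEMMAS AND PROOFS =====

-- front-recursive characterisation of tildeRun, used only in the proofs
def tildeRunF : List String → Nat
  | [] => 0
  | t :: r => if t == "~" && r.all (fun s => s == "~") then r.length + 1 else tildeRunF r

theorem tildeRunF_all (l : List String) (h : l.all (fun s => s == "~")) :
    tildeRunF l = l.length := by
  cases l with
  | nil => rfl
  | cons t r =>
    simp only [List.all_cons, Bool.and_eq_true] at h
    simp [tildeRunF, h.1, h.2]

theorem tildeRun_eq_F : ∀ l : List String, tildeRun l = tildeRunF l := by
  intro l
  induction l with
  | nil => rfl
  | cons t r ih =>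
    unfold tildeRun
    rw [List.reverse_cons, List.takeWhile_append]
    by_cases hall : r.all (fun s => s == "~")
    · have htw : List.takeWhile (fun s => s == "~") r.reverse = r.reverse := by
        apply List.takeWhile_eq_self_iff.mpr
        intro x hx
        exact List.all_eq_true.mp hall x (List.mem_reverse.mp hx)
      by_cases ht : t = "~"
      · simp [tildeRunF, htw, ht, hall]
      · simp [tildeRunF, htw, ht, hall, tildeRunF_all r hall]
    · have hne : (List.takeWhile (fun s => s == "~") r.reverse).length ≠ r.reverse.length := by
        intro hlen
        have heq := (List.takeWhile_prefix (l := r.reverse) (fun s => s == "~")).eq_of_length hlen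
        refine hall (List.all_eq_true.mpr fun x hx => ?_)
        have hxm : x ∈ List.takeWhile (fun s => s == "~") r.reverse := by
          rw [heq]; exact List.mem_reverse.mpr hx
        simpa using List.mem_takeWhile_imp hxm
      have hall' : ¬ ∀ x ∈ r, x = "~" := by simpa using hall
      simp only [List.length_reverse] at hne
      simp [tildeRunF, hne, hall']
      exact ih

-- descent through a merged pair "~" :: x :: r
theorem tildeRun_merge (x : String) (r : List String)
    (h : tildeRun ("~" :: x :: r) % 2 = 0) : tildeRun r % 2 = 0 := by
  rw [tildeRun_eq_F] at h ⊢
  unfold tildeRunF at h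
  by_cases hall : (x :: r).all (fun s => s == "~")
  · simp only [List.all_cons, Bool.and_eq_true] at hall
    rw [tildeRunF_all r hall.2]
    simp [hall.1, hall.2, List.length_cons] at h
    omega
  · by_cases hx : x == "~"
    · have hr : ¬ r.all (fun s => s == "~") := fun hc => hall (by simp [hx, hc])
      simpa [hall, tildeRunF, hx, hr] using h
    · simpa [hall, tildeRunF, hx] using h

-- descent through a non-"~" token
theorem tildeRun_skip (t : String) (r : List String) (ht : ¬ t = "~") :
    tildeRun (t :: r) = tildeRun r := by
  rw [tildeRun_eq_F, tildeRun_eq_F]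
  have : (t == "~") = false := by simpa using ht
  simp [tildeRunF, this]

theorem tildeRun_single : tildeRun ["~"] = 1 := by decide

-- the A loop with i elements finalized equals take i ++ B's pass over the rest
theorem loop_eq_negMerge : ∀ (prop opp : List String) (i : Nat),
    tildeRun (prop.drop i) % 2 = 0 →
    checkNegacaoA_loop prop opp i = prop.take i ++ negMerge (prop.drop i) := by
  intro prop opp i
  induction prop, opp, i using checkNegacaoA_loop.induct with
  | case2 prop opp i h heq prep hp merged ih =>
    -- prop[i] = "~", prop[i+1] = prep (merge step)
    intro hrun
    have h2 : i + 1 < prop.length := by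
      rw [PySem.List.pyGet?_natCast] at hp
      exact (List.getElem?_eq_some_iff.mp hp).1
    have hprep : prop[i + 1] = prep := by
      rw [PySem.List.pyGet?_natCast] at hp
      exact (List.getElem?_eq_some_iff.mp hp).2
    have hdropi : prop.drop i = "~" :: prep :: prop.drop (i + 2) := by
      rw [List.drop_eq_getElem_cons h, heq]
      congr 1
      rw [List.drop_eq_getElem_cons h2, hprep]
    -- decompose prop' = set/eraseIdx as take i ++ merged :: drop (i+2)
    have hset : prop.set i ("~" ++ prep) = prop.take i ++ ("~" ++ prep) :: prop.drop (i + 1) := by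
      rw [List.set_eq_take_append_cons_drop, if_pos h]
    have hlen : (prop.take i ++ [("~" ++ prep)]).length = i + 1 := by
      simp [List.length_take, Nat.min_eq_left (le_of_lt h)]
    have hprop' : (prop.set i ("~" ++ prep)).eraseIdx (i + 1)
        = (prop.take i ++ [("~" ++ prep)]) ++ prop.drop (i + 2) := by
      rw [hset, List.drop_eq_getElem_cons h2, hprep]
      rw [show prop.take i ++ ("~" ++ prep) :: prep :: prop.drop (i + 2)
            = (prop.take i ++ [("~" ++ prep)]) ++ prep :: prop.drop (i + 2) by simp]
      rw [List.eraseIdx_append_of_length_le (by omega), hlen]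
      simp
    -- unfold one step of the loop
    rw [checkNegacaoA_loop]
    simp only [h, dif_pos, heq, if_pos]
    split
    · rename_i hnone
      rw [hp] at hnone
      cases hnone
    · rename_i prep' hsome
      rw [hp] at hsome
      cases hsome
      have hrun2 : tildeRun (prop.drop (i + 2)) % 2 = 0 := by
        rw [hdropi] at hrun; exact tildeRun_merge _ _ hrun
      have hrw : ((prop.set i ("~" ++ prep)).eraseIdx (i + 1)).drop (i + 1)
          = prop.drop (i + 2) := by
        rw [hprop', ← hlen, List.drop_left]
      have ih' := ih (by rw [hrw]; exact hrun2)
      rw [ih', hrw, hprop', ← hlen, List.take_left, hdropi]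
      simp [negMerge]
  | case1 prop opp i h heq hp =>
    -- prop[i] = "~" but i+1 out of range: contradicts the run-parity hypothesis
    intro hrun
    exfalso
    have h2 : ¬ i + 1 < prop.length := by
      intro hlt
      rw [PySem.List.pyGet?_natCast, List.getElem?_eq_getElem hlt] at hp
      exact (Option.some_ne_none _) hp
    have : prop.drop i = ["~"] := by
      rw [List.drop_eq_getElem_cons h, heq]
      have : prop.drop (i + 1) = [] := List.drop_eq_nil_of_le (by omega)
      rw [this]
    rw [this, tildeRun_single] at hrun
    omega
  | case3 prop opp i h heq ih =>
    -- prop[i] ≠ "~" (skip step)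
    intro hrun
    have hdropi : prop.drop i = prop[i] :: prop.drop (i + 1) := List.drop_eq_getElem_cons h
    have hrun1 : tildeRun (prop.drop (i + 1)) % 2 = 0 := by
      rw [hdropi, tildeRun_skip _ _ heq] at hrun; exact hrun
    rw [checkNegacaoA_loop]
    simp only [h, dif_pos, if_neg heq]
    rw [ih hrun1, hdropi]
    have htake : List.take (i + 1) prop = List.take i prop ++ [prop[i]] := by
      rw [List.take_succ, List.getElem?_eq_getElem h]; rfl
    have hnm : negMerge (prop[i] :: prop.drop (i + 1)) = prop[i] :: negMerge (prop.drop (i + 1)) := by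
      rw [negMerge.eq_def]
      simp [heq]
    rw [htake, hnm, List.append_assoc, List.singleton_append]
  | case4 prop opp i h =>
    intro _
    rw [checkNegacaoA_loop]
    simp only [h, dif_neg]
    rw [List.drop_eq_nil_of_le (by omega), List.take_of_length_le (by omega)]
    simp [negMerge]

-- ===== VERDICT (by name: the statement is the Claim_ definition above) =====
theorem checkNegacao_spec : Claim_equal_checkNegacao := by
  intro prop opp _ hpre
  unfold Spec_checkNegacao checkNegacao checkNegacao_alt
  have := loop_eq_negMerge prop opp 0 (by simpa using hpre)
  simpa using this
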